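-- pv_equiv track=rewrite | github.com/diogo-pessoa/coding-exercises | algorithms/quicksort/QuickSort.py | _pivot_by_median_of_three
-- ===== SOURCE A (Python) =====
-- def _pivot_by_median_of_three(list_to_sort, left_index, right_index):
--     """
--     pivot by median of three elements in the partition
--     :param list_to_sort:
--     :param left_index:
--     :param right_index:
--     :return:
--     """
--     first_element = list_to_sort[left_index]
--     middle_element = list_to_sort[(left_index + right_index) // 2]
--     last_element = list_to_sort[right_index]
--     pivot = sorted([first_element, middle_element, last_element])[1]
--     lesser_partition = [value for value in list_to_sort if value < pivot]
--     greater_partition = [value for value in list_to_sort if value > pivot]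
--     equal_partition = [value for value in list_to_sort if value == pivot]
--     return lesser_partition, equal_partition, greater_partition
-- ===== SOURCE B (Python) =====
-- def _pivot_by_median_of_three(list_to_sort, left_index, right_index):
--     first_element = list_to_sort[left_index]
--     middle_element = list_to_sort[(left_index + right_index) // 2]
--     last_element = list_to_sort[right_index]
--     # median of three = sum minus the extremes (no sorting)
--     pivot = (first_element + middle_element + last_element
--              - min(first_element, middle_element, last_element)
--              - max(first_element, middle_element, last_element))
--     lesser_partition, equal_partition, greater_partition = [], [], []
--     for value in list_to_sort:
--         if value < pivot:
--             lesser_partition.append(value)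
--         elif value > pivot:
--             greater_partition.append(value)
--         else:
--             equal_partition.append(value)
--     return lesser_partition, equal_partition, greater_partition
-- ===== Notes on version B (the rewrite author's own statement) =====
-- stated objective: alternative
-- what changed: Pivot is computed arithmetically (sum minus min minus max) instead of sorting a 3-list, and the three separate list comprehensions are replaced by a single dispatching pass over the list maintaining three accumulators.
import Mathlib
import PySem

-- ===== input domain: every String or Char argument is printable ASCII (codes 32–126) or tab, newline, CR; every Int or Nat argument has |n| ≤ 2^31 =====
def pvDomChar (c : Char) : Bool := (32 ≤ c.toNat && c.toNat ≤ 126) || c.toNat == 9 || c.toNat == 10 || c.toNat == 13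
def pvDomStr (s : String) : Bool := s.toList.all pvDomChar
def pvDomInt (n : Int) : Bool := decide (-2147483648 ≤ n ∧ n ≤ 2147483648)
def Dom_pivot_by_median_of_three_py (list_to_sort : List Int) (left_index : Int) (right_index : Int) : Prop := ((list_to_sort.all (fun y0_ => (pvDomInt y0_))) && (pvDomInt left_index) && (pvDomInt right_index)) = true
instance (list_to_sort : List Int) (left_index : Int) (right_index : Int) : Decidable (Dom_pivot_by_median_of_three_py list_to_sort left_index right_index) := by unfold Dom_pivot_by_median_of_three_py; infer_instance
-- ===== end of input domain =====

-- B computes the median-of-three pivot arithmetically (sum minus extremes, no sorting)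
-- and partitions in a single pass with three accumulators instead of three list comprehensions.


-- ===== PORT A =====
def pivot_by_median_of_three_py (list_to_sort : List Int) (left_index : Int) (right_index : Int) : List Int × List Int × List Int :=
  let first_element := PySem.List.pyGetD list_to_sort left_index 0   -- pyGetD exact under Pre_ (indices in range)
  let middle_element := PySem.List.pyGetD list_to_sort (PySem.Int.floordiv (left_index + right_index) 2) 0
  let last_element := PySem.List.pyGetD list_to_sort right_index 0
  let pivot := PySem.List.pyGetD (PySem.List.sorted [first_element, middle_element, last_element] (fun x => x) false) 1 0
  let lesser_partition := list_to_sort.filter (fun value => decide (value < pivot))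
  let greater_partition := list_to_sort.filter (fun value => decide (value > pivot))
  let equal_partition := list_to_sort.filter (fun value => value == pivot)
  (lesser_partition, equal_partition, greater_partition)

-- ===== PORT B =====
def pivot_by_median_of_three_py_alt (list_to_sort : List Int) (left_index : Int) (right_index : Int) : List Int × List Int × List Int :=
  let a := PySem.List.pyGetD list_to_sort left_index 0   -- pyGetD exact under Pre_ (indices in range)
  let b := PySem.List.pyGetD list_to_sort (PySem.Int.floordiv (left_index + right_index) 2) 0
  let c := PySem.List.pyGetD list_to_sort right_index 0
  let pivot := a + b + c - min (min a b) c - max (max a b) c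
  list_to_sort.foldl
    (fun s value =>
      if value < pivot then (s.1 ++ [value], s.2.1, s.2.2)
      else if value > pivot then (s.1, s.2.1, s.2.2 ++ [value])
      else (s.1, s.2.1 ++ [value], s.2.2))
    ([], [], [])

-- ===== PRECONDITION & SPEC =====
-- Pre_ excludes exactly the inputs where Python raises IndexError (an index out of range).
def Pre_pivot_by_median_of_three_py (list_to_sort : List Int) (left_index : Int) (right_index : Int) : Prop :=
  PySem.Raise.InRange list_to_sort.length left_index ∧
  PySem.Raise.InRange list_to_sort.length (PySem.Int.floordiv (left_index + right_index) 2) ∧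
  PySem.Raise.InRange list_to_sort.length right_index
instance (list_to_sort : List Int) (left_index : Int) (right_index : Int) : Decidable (Pre_pivot_by_median_of_three_py list_to_sort left_index right_index) := by unfold Pre_pivot_by_median_of_three_py; infer_instance
def pvWitness_pivot_by_median_of_three_py : List Int × Int × Int := ([3, 1, 2], 0, 2)
def Spec_pivot_by_median_of_three_py (list_to_sort : List Int) (left_index : Int) (right_index : Int) (out : List Int × List Int × List Int) : Prop := out = pivot_by_median_of_three_py_alt list_to_sort left_index right_index
instance (list_to_sort : List Int) (left_index : Int) (right_index : Int) (out : List Int × List Int × List Int) : Decidable (Spec_pivot_by_median_of_three_py list_to_sort left_index right_index out) := by unfold Spec_pivot_by_median_of_three_py; infer_instance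

-- ===== CLAIM (what is proved, stated in full; the proofs are below) =====
def Claim_equal_pivot_by_median_of_three_py : Prop := ∀ (list_to_sort : List Int) (left_index : Int) (right_index : Int), Dom_pivot_by_median_of_three_py list_to_sort left_index right_index → Pre_pivot_by_median_of_three_py list_to_sort left_index right_index → Spec_pivot_by_median_of_three_py list_to_sort left_index right_index (pivot_by_median_of_three_py list_to_sort left_index right_index)

-- ===== LEMMAS AND PROOFS =====

-- the middle of sorted([a,b,c]) is the sum minus the two extremes
theorem median3_eq (a b c : Int) :
    PySem.List.pyGetD (PySem.List.sorted [a, b, c] (fun x => x) false) 1 0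
      = a + b + c - min (min a b) c - max (max a b) c := by
  rcases lt_or_ge b a with h1 | h1 <;> rcases lt_or_ge c a with h2 | h2 <;> rcases lt_or_ge c b with h3 | h3 <;>
    simp [PySem.List.sorted_eq_foldl_insertBy, PySem.List.insertBy, PySem.List.pyGetD, h1, h2, h3,
      not_lt.mpr, min_def, max_def] <;> omega

-- the single dispatching pass produces the three filters
theorem part3_eq (p : Int) (xs l e g : List Int) :
    xs.foldl
      (fun s value =>
        if value < p then (s.1 ++ [value], s.2.1, s.2.2)
        else if value > p then (s.1, s.2.1, s.2.2 ++ [value])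
        else (s.1, s.2.1 ++ [value], s.2.2))
      (l, e, g)
      = (l ++ xs.filter (fun value => decide (value < p)),
         e ++ xs.filter (fun value => value == p),
         g ++ xs.filter (fun value => decide (value > p))) := by
  induction xs generalizing l e g with
  | nil => simp
  | cons x xs ih =>
    by_cases h1 : x < p
    · simp [List.foldl_cons, h1, ih, Int.ne_of_lt h1, not_lt_of_gt h1]
    · by_cases h2 : x > p
      · simp [List.foldl_cons, h1, h2, ih, (Int.ne_of_lt h2).symm]
      · have hx : x = p := le_antisymm (not_lt.mp h2) (not_lt.mp h1)
        simp [List.foldl_cons, ih, hx]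

-- ===== VERDICT (by name: the statement is the Claim_ definition above) =====
theorem pivot_by_median_of_three_py_spec : Claim_equal_pivot_by_median_of_three_py := by
  intro xs l r _ _
  unfold Spec_pivot_by_median_of_three_py pivot_by_median_of_three_py pivot_by_median_of_three_py_alt
  simp only []
  show _ = _
  rw [median3_eq, part3_eq]
  simp
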